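-- pv_equiv track=rewrite | github.com/larsklingsten/hackerakademi.dk_challenge_2026 | home_users/root@hostcontainer/git/pwgen/passwdGen.py | passwordGen
-- ===== SOURCE A (Python) =====
-- import string
--
-- a = 6700419
--
-- c = 1331
--
-- m = 2**32 - 1
--
-- lcgSeed = 0xfedd15
--
-- def lcg(seed, a, c, m, size):
--     """
--     Linear Congruential Generator (LCG) function.
--
--     Parameters
--     ----------
--     seed : `int`
--         The initial value (X0) for the LCG.
--     a : `int`
--         The multiplier.
--     c : `int`
--         The increment.
--     m : `int`
--         The modulus.
--     size : `int`
--         The number of random numbers to generate.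
--
--     Returns
--     -------
--     `array[int]`
--         An array containing the generated sequence.
--     """
--     # Initialize the sequence array with zeros
--     sequence = [0] * size
--
--     # Run through the lcg to the initial state
--     state = lcgSeed % m
--     for i in range(1, seed):
--         state = (a * state + c) % m
--
--     # Set the initial value
--     sequence[0] = state % m
--
--     # Generate the sequence
--     for i in range(1, size):
--         sequence[i] = (a * sequence[i - 1] + c) % m
--
--     return sequence
--
-- def passwordGen(seed, passLen=16):
--     """
--     Password generator
--
--     Parameters
--     ----------
--     seed : `int`
--         The initial value (X0) for the LCG.
--     passLen : `int`
--         The lenght of the password, i.e. the number of chars in the password.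
--
--     Returns
--     -------
--     'string'
--         A string which is the generated password.
--     """
--     # Initializing the password
--     password = ""
--
--     # Initializing the list of characters
--     characterList = ""
--     characterList += string.ascii_letters
--     characterList += string.digits
--     characterList += string.punctuation
--
--     # Generating the sequence of random integers
--     random_sequence = lcg(seed, a, c, m, passLen)
--
--     # transforming the integers to characters and adding them to the password
--     for i in range(passLen):
--         char = characterList[random_sequence[i] % len(characterList)]
--         password += char
--
--     return password
-- ===== SOURCE B (Python) =====
-- import string
--
-- def _powGeom(a, k, m):
--     """Return (a**k % m, (1 + a + ... + a**(k-1)) % m) by fast doubling."""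
--     if k == 0:
--         return (1 % m, 0)
--     p, g = _powGeom(a, k // 2, m)
--     p2 = p * p % m
--     g2 = g * (1 + p) % m
--     if k % 2 == 0:
--         return (p2, g2)
--     return (a * p2 % m, (a * g2 + 1) % m)
--
-- def passwordGen(seed, passLen=16):
--     a = 6700419
--     c = 1331
--     m = 2 ** 32 - 1
--     chars = string.ascii_letters + string.digits + string.punctuation
--     # number of warm-up LCG steps A performs
--     k = seed - 1 if seed > 1 else 0
--     p, g = _powGeom(a, k, m)
--     state = (p * (0xfedd15 % m) + c * g) % m
--     out = []
--     for _ in range(passLen):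
--         out.append(chars[state % len(chars)])
--         state = (a * state + c) % m
--     return ''.join(out)
-- ===== Notes on version B (the rewrite author's own statement) =====
-- stated objective: faster
-- what changed: B replaces A's O(seed) warm-up loop by fast-doubling of the pair (a^k mod m, 1+a+...+a^(k-1) mod m), recombining them into the warm state in O(log seed), and emits the password in one state-carrying pass instead of materialising the full sequence list first.
-- outside the precondition, e.g. on passwordGen(5, 0): A raises IndexError, B returns ''
import Mathlib
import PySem

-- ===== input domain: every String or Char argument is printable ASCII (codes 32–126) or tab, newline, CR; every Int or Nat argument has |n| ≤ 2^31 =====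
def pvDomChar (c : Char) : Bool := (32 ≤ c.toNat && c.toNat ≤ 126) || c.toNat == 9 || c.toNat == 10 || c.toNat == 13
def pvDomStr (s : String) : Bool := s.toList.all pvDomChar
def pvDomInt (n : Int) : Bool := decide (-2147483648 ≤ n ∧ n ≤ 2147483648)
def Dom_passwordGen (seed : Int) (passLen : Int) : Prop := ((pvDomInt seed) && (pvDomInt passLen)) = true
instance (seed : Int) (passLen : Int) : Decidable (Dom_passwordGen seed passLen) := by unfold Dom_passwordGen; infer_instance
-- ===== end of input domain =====

-- B replaces A's O(seed) warm-up loop by O(log seed) fast-doubling of (a^k, 1+a+…+a^(k-1)) mod m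
-- and emits the password in one state-carrying pass instead of materialising the index list.

-- ===== PORT A =====
-- module constants of Source A
def pvA : Int := 6700419
def pvC : Int := 1331
def pvM : Int := 2 ^ 32 - 1
def pvLcgSeed : Int := 0xfedd15
-- string.ascii_letters + string.digits + string.punctuation, as the list of its characters
def pvChars : List Char :=
  "abcdefghijklmnopqrstuvwxyzABCDEFGHIJKLMNOPQRSTUVWXYZ0123456789!\"#$%&'()*+,-./:;<=>?@[\\]^_`{|}~".toList

-- literal port of lcg(seed, a, c, m, size).  [0]*size is [] for size ≤ 0 (toNat clamps exactly so);
-- sequence[0] = … raises IndexError then — those inputs are excluded by Pre_ (pySetD is its total form).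
def pvLcg (seed a c m size : Int) : List Int :=
  let sequence : List Int := List.replicate size.toNat 0
  let state := PySem.Int.mod pvLcgSeed m
  let state := (PySem.List.pyRange 1 seed 1).foldl (fun st _ => PySem.Int.mod (a * st + c) m) state
  let sequence := PySem.List.pySetD sequence 0 (PySem.Int.mod state m)
  (PySem.List.pyRange 1 size 1).foldl
    (fun seq i =>
      PySem.List.pySetD seq i (PySem.Int.mod (a * PySem.List.pyGetD seq (i - 1) 0 + c) m))
    sequence

def passwordGen (seed : Int) (passLen : Int) : String :=
  let characterList := pvChars
  let random_sequence := pvLcg seed pvA pvC pvM passLen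
  let password := (PySem.List.pyRange 0 passLen 1).foldl
    (fun pw i =>
      pw ++ [PySem.List.pyGetD characterList
        (PySem.Int.mod (PySem.List.pyGetD random_sequence i 0) (characterList.length : Int)) ' '])
    ([] : List Char)
  String.ofList password

-- ===== PORT B =====
-- _powGeom(a, k, m): (a^k % m, (1+a+…+a^(k-1)) % m) by fast doubling on k (k ≥ 0 in Source B, so Nat)
def pvPowGeom (a : Int) (k : Nat) (m : Int) : Int × Int :=
  if h : k = 0 then (PySem.Int.mod 1 m, 0)
  else
    let r := pvPowGeom a (k / 2) m
    let p2 := PySem.Int.mod (r.1 * r.1) m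
    let g2 := PySem.Int.mod (r.2 * (1 + r.1)) m
    if k % 2 = 0 then (p2, g2)
    else (PySem.Int.mod (a * p2) m, PySem.Int.mod (a * g2 + 1) m)
decreasing_by exact Nat.div_lt_self (Nat.pos_of_ne_zero h) one_lt_two

-- the for-loop of Source B: append chars[state % 94], then advance the state
def pvGenLoop (a c m : Int) (chars : List Char) : Nat → Int → List Char
  | 0, _ => []
  | n + 1, st =>
      PySem.List.pyGetD chars (PySem.Int.mod st (chars.length : Int)) ' '
        :: pvGenLoop a c m chars n (PySem.Int.mod (a * st + c) m)

def passwordGen_alt (seed : Int) (passLen : Int) : String :=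
  let a : Int := 6700419
  let c : Int := 1331
  let m : Int := 2 ^ 32 - 1
  let chars := pvChars
  -- k = seed - 1 if seed > 1 else 0   (number of warm-up steps; nonnegative, taken as Nat)
  let k : Nat := if 1 < seed then (seed - 1).toNat else 0
  let pg := pvPowGeom a k m
  let state := PySem.Int.mod (pg.1 * PySem.Int.mod 16702741 m + c * pg.2) m
  String.ofList (pvGenLoop a c m chars passLen.toNat state)

-- ===== PRECONDITION & SPEC =====
-- Pre_ excludes exactly passLen ≤ 0, where A's 'sequence[0] = …' raises IndexError ([0]*size is empty).
def Pre_passwordGen (seed : Int) (passLen : Int) : Prop := 1 ≤ passLen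
instance (seed : Int) (passLen : Int) : Decidable (Pre_passwordGen seed passLen) := by
  unfold Pre_passwordGen; infer_instance

def pvWitness_passwordGen : Int × Int := (5, 8)

def Spec_passwordGen (seed : Int) (passLen : Int) (out : String) : Prop := out = passwordGen_alt seed passLen
instance (seed : Int) (passLen : Int) (out : String) : Decidable (Spec_passwordGen seed passLen out) := by
  unfold Spec_passwordGen; infer_instance

-- ===== CLAIM (what is proved, stated in full; the proofs are below) =====
def Claim_equal_passwordGen : Prop := ∀ (seed : Int) (passLen : Int), Dom_passwordGen seed passLen → Pre_passwordGen seed passLen → Spec_passwordGen seed passLen (passwordGen seed passLen)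

-- ===== LEMMAS AND PROOFS =====

-- the LCG step and its iterates (proof-side abstraction of both programs' recurrence)
def pvStep (s : Int) : Int := PySem.Int.mod (pvA * s + pvC) pvM
def pvStepn : Nat → Int → Int
  | 0, s => s
  | n + 1, s => pvStep (pvStepn n s)
-- the warm state both programs reach
def pvW (seed : Int) : Int := pvStepn (seed - 1).toNat (PySem.Int.mod pvLcgSeed pvM)
-- geometric sum 1 + a + … + a^(k-1)
def pvG (k : Nat) : Int := ∑ i ∈ Finset.range k, pvA ^ i

theorem pvStepn_step (n : Nat) (s : Int) : pvStepn n (pvStep s) = pvStep (pvStepn n s) := by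
  induction n with
  | zero => rfl
  | succ n ih => simp [pvStepn, ih]

theorem pvFoldl_const (l : List Int) (s : Int) :
    l.foldl (fun st _ => pvStep st) s = pvStepn l.length s := by
  induction l generalizing s with
  | nil => rfl
  | cons x xs ih => simp [List.foldl, ih, pvStepn, pvStepn_step]

theorem pvMod_eq (x : Int) : PySem.Int.mod x pvM = x % pvM := by
  exact PySem.Int.mod_eq_emod_of_pos (by norm_num [pvM])

theorem pvStepn_formula (k : Nat) (s : Int) :
    pvStepn k (s % pvM) = (pvA ^ k * s + pvC * pvG k) % pvM := by
  induction k with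
  | zero => simp [pvStepn, pvG]
  | succ k ih =>
      have hG : pvG (k + 1) = pvA * pvG k + 1 := by
        simp [pvG, geom_sum_succ]
      simp only [pvStepn, ih, pvStep, pvMod_eq, hG]
      conv_lhs => rw [Int.add_emod, Int.mul_emod, Int.emod_emod_of_dvd _ dvd_rfl,
        ← Int.mul_emod, ← Int.add_emod]
      ring_nf

theorem pvPowGeom_spec (k : Nat) :
    pvPowGeom pvA k pvM = (pvA ^ k % pvM, pvG k % pvM) := by
  induction k using Nat.strong_induction_on with
  | _ k ih =>
    rw [pvPowGeom]
    by_cases h0 : k = 0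
    · subst h0
      simp [pvG, pvMod_eq]
    · have ih2 := ih (k / 2) (Nat.div_lt_self (Nat.pos_of_ne_zero h0) one_lt_two)
      have hGdouble : pvG (k / 2 + k / 2) = pvG (k / 2) * (1 + pvA ^ (k / 2)) := by
        simp [pvG, Finset.sum_range_add, pow_add, ← Finset.mul_sum]
        ring
      have hp2 : (pvA ^ (k / 2) % pvM) * (pvA ^ (k / 2) % pvM) % pvM
          = pvA ^ (k / 2 + k / 2) % pvM := by
        rw [← Int.mul_emod, ← pow_add]
      have hg2 : (pvG (k / 2) % pvM) * (1 + pvA ^ (k / 2) % pvM) % pvM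
          = pvG (k / 2 + k / 2) % pvM := by
        rw [Int.mul_emod, Int.emod_emod_of_dvd _ dvd_rfl, Int.add_emod, Int.emod_emod_of_dvd _ dvd_rfl,
          ← Int.add_emod, ← Int.mul_emod, hGdouble]
      by_cases hpar : k % 2 = 0
      · have hk : k / 2 + k / 2 = k := by omega
        simp [h0, hpar, ih2, pvMod_eq, hp2, hg2, hk]
      · have hk : k / 2 + k / 2 + 1 = k := by omega
        have hpow : pvA * (pvA ^ (k / 2 + k / 2) % pvM) % pvM = pvA ^ k % pvM := by
          rw [Int.mul_emod, Int.emod_emod_of_dvd _ dvd_rfl, ← Int.mul_emod]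
          congr 1
          conv_rhs => rw [← hk, pow_succ]
          ring
        have hgeo : (pvA * (pvG (k / 2 + k / 2) % pvM) + 1) % pvM = pvG k % pvM := by
          rw [Int.add_emod, Int.mul_emod, Int.emod_emod_of_dvd _ dvd_rfl, ← Int.mul_emod,
            ← Int.add_emod]
          congr 1
          conv_rhs => rw [← hk]
          simp [pvG, geom_sum_succ]
        simp [h0, hpar, ih2, pvMod_eq, hp2, hg2, hpow, hgeo]

-- the list A's generating loop produces: the iterates of pvStep from the warm state
theorem pvSeq_fold (w : Int) (d j : Nat) (hj : 1 ≤ j) :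
    (PySem.List.pyRange (j : Int) ((j : Int) + (d : Int)) 1).foldl
      (fun seq i =>
        PySem.List.pySetD seq i
          (PySem.Int.mod (pvA * PySem.List.pyGetD seq (i - 1) 0 + pvC) pvM))
      ((List.range j).map (fun i => pvStepn i w) ++ List.replicate d 0)
    = (List.range (j + d)).map (fun i => pvStepn i w) := by
  induction d generalizing j with
  | zero =>
      rw [PySem.List.pyRange_one_eq_nil (by omega)]
      simp
  | succ d ih =>
      rw [PySem.List.pyRange_one_cons (by push_cast; omega), List.foldl_cons]
      have hlen : ((List.range j).map (fun i => pvStepn i w)).length = j := by simp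
      have hget : PySem.List.pyGetD
          ((List.range j).map (fun i => pvStepn i w) ++ List.replicate (d + 1) 0) ((j : Int) - 1) 0
          = pvStepn (j - 1) w := by
        rw [show (j : Int) - 1 = ((j - 1 : Nat) : Int) by omega, PySem.List.pyGetD_natCast,
          List.getD_append _ _ _ _ (by simp; omega),
          PySem.List.getD_map_range _ _ _ _ (by omega)]
      have hset : PySem.List.pySetD
          ((List.range j).map (fun i => pvStepn i w) ++ List.replicate (d + 1) 0) (j : Int)
          (pvStepn j w)
          = (List.range (j + 1)).map (fun i => pvStepn i w) ++ List.replicate d 0 := by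
        rw [PySem.List.pySetD_natCast, List.set_append_right _ _ (by omega), hlen,
          Nat.sub_self, List.replicate_succ, List.set_cons_zero, List.range_succ, List.map_append]
        simp
      have hstep : PySem.Int.mod (pvA * pvStepn (j - 1) w + pvC) pvM = pvStepn j w := by
        rw [show j = (j - 1) + 1 by omega]
        rfl
      rw [hget, hstep, hset]
      have hih := ih (j + 1) (by omega)
      push_cast at hih ⊢
      rw [show (j : Int) + ((d : Int) + 1) = (j : Int) + 1 + (d : Int) by ring,
        show j + (d + 1) = j + 1 + d by omega]
      exact hih

theorem pvGenLoop_eq (n : Nat) (st : Int) :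
    pvGenLoop pvA pvC pvM pvChars n st
      = (List.range n).map (fun i =>
          PySem.List.pyGetD pvChars
            (PySem.Int.mod (pvStepn i st) (pvChars.length : Int)) ' ') := by
  induction n generalizing st with
  | zero => rfl
  | succ n ih =>
      rw [pvGenLoop, List.range_succ_eq_map, List.map_cons, List.map_map]
      refine congrArg₂ _ rfl ?_
      rw [show PySem.Int.mod (pvA * st + pvC) pvM = pvStep st from rfl, ih]
      refine List.map_congr_left fun i _ => ?_
      simp [Function.comp, pvStepn_step, pvStepn]

theorem pvMod_pvW (seed : Int) : PySem.Int.mod (pvW seed) pvM = pvW seed := by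
  cases h : (seed - 1).toNat with
  | zero =>
      simp only [pvW, h, pvStepn, pvMod_eq]
      exact Int.emod_emod_of_dvd _ dvd_rfl
  | succ n =>
      simp only [pvW, h, pvStepn, pvStep, pvMod_eq]
      exact Int.emod_emod_of_dvd _ dvd_rfl

-- congruence mod pvM for B's recombination of the two fast-doubled residues
theorem pvMix (x s g : Int) :
    ((x % pvM) * (s % pvM) + pvC * (g % pvM)) % pvM = (x * s + pvC * g) % pvM := by
  have h1 : ∀ y : Int, (y % pvM) ≡ y [ZMOD pvM] := fun y => Int.emod_emod_of_dvd y dvd_rfl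
  exact ((h1 x).mul (h1 s)).add ((Int.ModEq.refl pvC).mul (h1 g))

-- B's skip-ahead start state is A's warm state
theorem pvState_eq (seed : Int) :
    PySem.Int.mod ((pvPowGeom pvA (seed - 1).toNat pvM).1 * PySem.Int.mod 16702741 pvM
      + pvC * (pvPowGeom pvA (seed - 1).toNat pvM).2) pvM = pvW seed := by
  rw [pvPowGeom_spec]
  simp only [pvMod_eq]
  rw [pvMix, ← pvStepn_formula]
  rw [pvW, pvMod_eq]
  rfl

-- ===== VERDICT (by name: the statement is the Claim_ definition above) =====
theorem passwordGen_spec : Claim_equal_passwordGen := by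
  intro seed passLen _ hpre
  unfold Pre_passwordGen at hpre
  unfold Spec_passwordGen passwordGen passwordGen_alt pvLcg
  simp only []
  obtain ⟨n, hn⟩ : ∃ n : Nat, passLen = (n : Int) + 1 := ⟨(passLen - 1).toNat, by omega⟩
  subst hn
  rw [show (6700419 : Int) = pvA from rfl, show (1331 : Int) = pvC from rfl,
    show (2 ^ 32 - 1 : Int) = pvM from rfl,
    show (if 1 < seed then (seed - 1).toNat else 0) = (seed - 1).toNat from by split <;> omega,
    pvState_eq seed, pvGenLoop_eq]
  -- A's warm-up loop is (seed-1).toNat iterations of pvStep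
  rw [show (fun st (_ : Int) => PySem.Int.mod (pvA * st + pvC) pvM) = (fun st _ => pvStep st) from rfl,
    pvFoldl_const, PySem.List.length_pyRange_one,
    show pvStepn (seed - 1).toNat (PySem.Int.mod pvLcgSeed pvM) = pvW seed from rfl,
    pvMod_pvW seed]
  -- the initial sequence [w, 0, …, 0]
  rw [show ((n : Int) + 1).toNat = n + 1 from by omega,
    PySem.List.pySetD_of_nonneg _ _ (le_refl 0), List.replicate_succ, Int.toNat_zero, List.set_cons_zero,
    show pvW seed :: List.replicate n 0 =
      (List.range 1).map (fun i => pvStepn i (pvW seed)) ++ List.replicate n 0 from by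
        simp [pvStepn],
    show PySem.List.pyRange 1 ((n : Int) + 1) 1 =
      PySem.List.pyRange ((1 : Nat) : Int) (((1 : Nat) : Int) + (n : Int)) 1 from by
        norm_num [add_comm],
    pvSeq_fold (pvW seed) n 1 (le_refl 1),
    PySem.List.foldl_append_singleton_eq_map, PySem.List.pyRange_zero, List.nil_append,
    List.map_map, show ((n : Int) + 1).toNat = n + 1 from by omega]
  refine congrArg _ (List.map_congr_left fun i hi => ?_)
  have hi' : i < n + 1 := List.mem_range.mp hi
  simp only [Function.comp]
  rw [PySem.List.pyGetD_natCast, PySem.List.getD_map_range _ _ _ _ (by omega)]
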